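-- pv_equiv track=rewrite | github.com/robinfelix25/DSA-with-python | Blind75/Dynamic_Programming/Leetcode/300Longest_Increasing_Subsequence.py | lengthOfLIS_sol1
-- ===== SOURCE A (Python) =====
-- def lengthOfLIS_sol1(nums):
--     res = []
--     def dfs(index, cur):
--         res.append(cur[:])
--
--         for i in range(index, len(nums)):
--             if i + 1 < len(nums) and nums[i+1] > nums[i]:
--                 dfs(i+1, cur + [nums[i]])
--
--     dfs(0, [])
--     return res
-- ===== SOURCE B (Python) =====
-- def lengthOfLIS_sol1(nums):
--     # Back-to-front DP: F is the preorder path list for the suffix starting at the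
--     # current index; each step builds it from the next index's list instead of DFS.
--     n = len(nums)
--     F = [[]]
--     for index in range(n - 1, -1, -1):
--         if index + 1 < n and nums[index + 1] > nums[index]:
--             F = [[]] + [[nums[index]] + t for t in F] + F[1:]
--         else:
--             F = [[]] + F[1:]
--     return F
-- ===== Notes on version B (the rewrite author's own statement) =====
-- stated objective: alternative
-- what changed: Replaces the recursive DFS with a global result list by a right-to-left dynamic program: the path list for the suffix starting at each index is built from the next index's list (prefix-map plus tail-append), returning the index-0 list.
import Mathlib
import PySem

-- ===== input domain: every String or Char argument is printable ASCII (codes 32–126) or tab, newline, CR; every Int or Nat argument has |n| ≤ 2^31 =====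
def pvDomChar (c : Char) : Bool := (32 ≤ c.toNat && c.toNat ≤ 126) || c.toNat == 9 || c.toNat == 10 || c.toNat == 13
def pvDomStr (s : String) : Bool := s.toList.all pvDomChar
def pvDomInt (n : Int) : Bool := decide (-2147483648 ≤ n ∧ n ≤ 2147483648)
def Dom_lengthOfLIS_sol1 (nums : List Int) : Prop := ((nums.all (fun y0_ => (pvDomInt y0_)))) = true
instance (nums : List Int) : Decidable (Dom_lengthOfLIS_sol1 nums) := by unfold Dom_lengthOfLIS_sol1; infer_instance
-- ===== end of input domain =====

-- B replaces A's DFS by a right-to-left DP over suffix start indices (objective: alternative decomposition).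

-- ===== PORT A =====
-- dfs emits cur, then the loop body for i = index .. len-1 recurses at i+1 when nums[i+1] > nums[i];
-- the global `res` collects emissions in order, so dfsA returns the emissions of one dfs call.
mutual
  def dfsA (nums : List Int) (index : Nat) (cur : List Int) : List (List Int) :=
    cur :: loopA nums index cur
  termination_by (nums.length - index, 1)

  def loopA (nums : List Int) (i : Nat) (cur : List Int) : List (List Int) :=
    if _h : i < nums.length then
      (if i + 1 < nums.length ∧ nums.getD (i+1) 0 > nums.getD i 0
       then dfsA nums (i+1) (cur ++ [nums.getD i 0]) else [])
      ++ loopA nums (i+1) cur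
    else []
  termination_by (nums.length - i, 0)
end

def lengthOfLIS_sol1 (nums : List Int) : List (List Int) := dfsA nums 0 []

-- ===== PORT B =====
-- FB nums k is the value of Python B's variable F after k iterations of the loop
-- (i.e. after processing indices n-1 down to n-k).
def FB (nums : List Int) : Nat → List (List Int)
  | 0 => [[]]
  | k+1 =>
    let index := nums.length - (k+1)
    let F := FB nums k
    if index + 1 < nums.length ∧ nums.getD (index+1) 0 > nums.getD index 0
    then [] :: (F.map (fun t => nums.getD index 0 :: t)) ++ F.tail
    else [] :: F.tail

def lengthOfLIS_sol1_alt (nums : List Int) : List (List Int) := FB nums nums.length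

-- ===== PRECONDITION & SPEC =====
def Spec_lengthOfLIS_sol1 (nums : List Int) (out : List (List Int)) : Prop := out = lengthOfLIS_sol1_alt nums
instance (nums : List Int) (out : List (List Int)) : Decidable (Spec_lengthOfLIS_sol1 nums out) := by unfold Spec_lengthOfLIS_sol1; infer_instance

-- ===== CLAIM (what is proved, stated in full; the proofs are below) =====
def Claim_equal_lengthOfLIS_sol1 : Prop := ∀ (nums : List Int), Dom_lengthOfLIS_sol1 nums → Spec_lengthOfLIS_sol1 nums (lengthOfLIS_sol1 nums)

-- ===== LEMMAS AND PROOFS =====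

-- The DFS output at (i, cur) is the output at (i, []) with cur prepended to every path.
theorem loopA_map (nums : List Int) (i : Nat) (cur : List Int) :
    loopA nums i cur = (loopA nums i []).map (fun t => cur ++ t) := by
  have e1 := loopA.eq_def nums i cur
  have e2 := loopA.eq_def nums i []
  by_cases h : i < nums.length
  · rw [e1, e2, dif_pos h, dif_pos h]
    have ih := loopA_map nums (i+1) cur
    by_cases hc : i + 1 < nums.length ∧ nums.getD (i+1) 0 > nums.getD i 0
    · rw [if_pos hc, if_pos hc]
      have ih2 := loopA_map nums (i+1) (cur ++ [nums.getD i 0])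
      have ih3 := loopA_map nums (i+1) ([] ++ [nums.getD i 0])
      rw [dfsA.eq_def, dfsA.eq_def, ih, ih2, ih3]
      simp [List.map_map, Function.comp_def]
    · rw [if_neg hc, if_neg hc]
      simpa using ih
  · rw [e1, e2, dif_neg h, dif_neg h]
    simp
termination_by (nums.length - i, 0)
decreasing_by all_goals simp_all; omega

theorem FB_eq_dfsA (nums : List Int) (k : Nat) (hk : k ≤ nums.length) :
    FB nums k = dfsA nums (nums.length - k) [] := by
  induction k with
  | zero =>
    rw [FB, dfsA.eq_def, loopA.eq_def]
    simp
  | succ k ih =>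
    have ihk := ih (Nat.le_of_succ_le hk)
    have hidx : nums.length - (k+1) < nums.length := by omega
    have hsucc : nums.length - (k+1) + 1 = nums.length - k := by omega
    simp only [FB]
    rw [dfsA.eq_def, loopA.eq_def, dif_pos hidx, hsucc]
    by_cases hc : nums.length - (k+1) + 1 < nums.length ∧
        nums.getD (nums.length - (k+1) + 1) 0 > nums.getD (nums.length - (k+1)) 0
    · have hc' : nums.length - k < nums.length ∧
          nums.getD (nums.length - k) 0 > nums.getD (nums.length - (k+1)) 0 := by
        rwa [hsucc] at hc
      rw [if_pos hc', if_pos hc']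
      rw [dfsA.eq_def, loopA_map nums (nums.length - k) ([] ++ [nums.getD (nums.length - (k+1)) 0])]
      rw [ihk, dfsA.eq_def]
      simp
    · have hc' : ¬ (nums.length - k < nums.length ∧
          nums.getD (nums.length - k) 0 > nums.getD (nums.length - (k+1)) 0) := by
        rwa [hsucc] at hc
      rw [if_neg hc', if_neg hc']
      rw [ihk, dfsA.eq_def]
      simp

-- ===== VERDICT (by name: the statement is the Claim_ definition above) =====
theorem lengthOfLIS_sol1_spec : Claim_equal_lengthOfLIS_sol1 := by
  intro nums _
  unfold Spec_lengthOfLIS_sol1 lengthOfLIS_sol1 lengthOfLIS_sol1_alt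
  rw [FB_eq_dfsA nums nums.length (le_refl _)]
  simp
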